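-- pv_equiv track=rewrite | github.com/siyile/leetcode | src/UpTo1500/Problem1434.py | numberWays
-- ===== SOURCE A (Python) =====
-- def numberWays(hats) -> int:
--     MOD = 10 ** 9 + 7
--     n = len(hats)
--     t = 1 << n
--     people = [[] for _ in range(41)]
--     for i, hat in enumerate(hats):
--         for h in hat:
--             people[h].append(i)
--
--     dp = [[0 for _ in range(t)] for _ in range(41)]
--
--     dp[0][0] = 1
--
--     for i in range(1,41):
--         for mask in range(t):
--             dp[i][mask] = dp[i-1][mask]
--             for p in people[i]:
--                 if (mask & 1 << p) > 0:
--                     dp[i][mask] = (dp[i][mask] + dp[i-1][mask & ~(1 << p)]) % MOD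
--
--     ans = max(dp[i][t-1] for i in range(40))
--     return dp[40][t-1]
-- ===== SOURCE B (Python) =====
-- def numberWays(hats) -> int:
--     MOD = 10 ** 9 + 7
--     n = len(hats)
--     full = (1 << n) - 1
--     people = [[] for _ in range(41)]
--     for i, hat in enumerate(hats):
--         for h in hat:
--             people[h].append(i)
--
--     memo = {}
--
--     def ways(hat, mask):
--         # ways to hand out hats hat..40 so that, together with mask, everyone is covered
--         if hat == 41:
--             return 1 if mask == full else 0
--         if (hat, mask) in memo:
--             return memo[(hat, mask)]
--         total = ways(hat + 1, mask)
--         for p in people[hat]: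
--             if mask >> p & 1 == 0:
--                 total = (total + ways(hat + 1, mask | 1 << p)) % MOD
--         memo[(hat, mask)] = total
--         return total
--
--     return ways(1, 0)
-- ===== Notes on version B (the rewrite author's own statement) =====
-- stated objective: alternative
-- what changed: A fills the full bottom-up 41 x 2^n DP table dp[hat][mask] over all masks; B is a top-down memoized recursion ways(hat, mask) over the mask of already-covered people (base case at hat == 41, transitions mask | 1<<p), evaluating only states reachable from (1, 0).
import Mathlib
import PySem

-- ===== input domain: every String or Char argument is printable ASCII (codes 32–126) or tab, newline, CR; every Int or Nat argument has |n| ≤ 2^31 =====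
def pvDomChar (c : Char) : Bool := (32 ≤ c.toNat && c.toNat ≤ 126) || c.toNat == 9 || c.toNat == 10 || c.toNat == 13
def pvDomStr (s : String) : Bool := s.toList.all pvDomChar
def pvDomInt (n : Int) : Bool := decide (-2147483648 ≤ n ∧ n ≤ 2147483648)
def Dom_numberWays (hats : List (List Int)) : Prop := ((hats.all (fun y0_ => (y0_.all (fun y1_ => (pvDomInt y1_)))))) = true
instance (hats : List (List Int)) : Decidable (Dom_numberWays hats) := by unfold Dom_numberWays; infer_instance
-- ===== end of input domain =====

-- B replaces A's full 41×2^n bottom-up table with a top-down memoized recursion over hats 1..40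
-- and the mask of already-covered people, visiting only reachable states (objective: alternative).


-- Shared helper: both Pythons build `people` by the identical loop
-- `for i, hat in enumerate(hats): for h in hat: people[h].append(i)`.
-- Person indices are the enumerate indices 0..n-1, kept as Nat; Python's negative list
-- index people[h] (for -41 ≤ h ≤ -1) is hand-ported exactly as h+41 (Pre_ bounds h).
def pvPeople (hats : List (List Int)) : List (List Nat) :=
  hats.zipIdx.foldl
    (fun ppl iz =>
      iz.1.foldl
        (fun (ppl : List (List Nat)) h =>
          let idx := (if h < 0 then h + 41 else h).toNat
          ppl.set idx (ppl.getD idx [] ++ [iz.2]))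
        ppl)
    (List.replicate 41 [])

-- ===== PORT A =====
-- dp masks are the nonnegative ints range(t), kept as Nat; `mask & ~(1 << p)` is evaluated
-- only under the guard `mask & (1 << p) > 0`, where it equals `mask ^^^ (1 <<< p)`;
-- `% MOD` is PySem.Int.mod (Python's %); list indexing is getD with an unreachable default.
def numberWays (hats : List (List Int)) : Int :=
  let MOD : Int := 10 ^ 9 + 7
  let n := hats.length
  let t := 1 <<< n
  let people := pvPeople hats
  let table :=
    (List.range' 1 40).foldl
      (fun (tb : List (List Int)) i =>
        let prev := tb.getD (i - 1) []
        tb.set i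
          ((List.range t).map (fun mask =>
            (people.getD i []).foldl
              (fun acc p =>
                if mask &&& (1 <<< p) > 0 then
                  PySem.Int.mod (acc + prev.getD (mask ^^^ (1 <<< p)) 0) MOD
                else acc)
              (prev.getD mask 0))))
      (((List.replicate t (0 : Int)).set 0 1) :: List.replicate 40 (List.replicate t (0 : Int)))
  let _ans := PySem.List.max? ((List.range 40).map (fun i => (table.getD i []).getD (t - 1) 0)) (fun x => x)
  (table.getD 40 []).getD (t - 1) 0

-- ===== PORT B =====
-- memoized recursion ways(hat, mask) of Source B, fuel k = 41 - hat (base k = 0 is hat == 41);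
-- the memo dict is threaded through explicitly; `mask | 1 << p`, `mask >> p & 1` as in Source B.
def pvAltGo (people : List (List Nat)) (full : Nat) :
    Nat → Nat → PySem.Dict (Nat × Nat) Int → Int × PySem.Dict (Nat × Nat) Int
  | 0, mask, memo => ((if mask = full then 1 else 0), memo)
  | k + 1, mask, memo =>
    let hat := 40 - k
    match memo.get? (hat, mask) with
    | some v => (v, memo)
    | none =>
      let r0 := pvAltGo people full k mask memo
      let r :=
        (people.getD hat []).foldl
          (fun (acc : Int × PySem.Dict (Nat × Nat) Int) p =>
            if mask >>> p &&& 1 = 0 then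
              let r2 := pvAltGo people full k (mask ||| (1 <<< p)) acc.2
              (PySem.Int.mod (acc.1 + r2.1) (10 ^ 9 + 7), r2.2)
            else acc)
          r0
      (r.1, r.2.insert (hat, mask) r.1)

def numberWays_alt (hats : List (List Int)) : Int :=
  (pvAltGo (pvPeople hats) ((1 <<< hats.length) - 1) 40 0 PySem.Dict.empty).1

-- ===== PRECONDITION & SPEC =====
-- Pre_ excludes exactly the inputs where Python raises (IndexError on people[h]):
-- hat labels must lie in the list-index range -41 ≤ h ≤ 40 of the 41-slot people list.
def Pre_numberWays (hats : List (List Int)) : Prop :=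
  ∀ hat ∈ hats, ∀ h ∈ hat, -41 ≤ h ∧ h ≤ 40

instance (hats : List (List Int)) : Decidable (Pre_numberWays hats) := by
  unfold Pre_numberWays; infer_instance

def pvWitness_numberWays : List (List Int) := [[3, 4], [4, 5], [5]]

def Spec_numberWays (hats : List (List Int)) (out : Int) : Prop := out = numberWays_alt hats
instance (hats : List (List Int)) (out : Int) : Decidable (Spec_numberWays hats out) := by
  unfold Spec_numberWays; infer_instance

-- ===== CLAIM (what is proved, stated in full; the proofs are below) =====
def Claim_equal_numberWays : Prop :=
  ∀ (hats : List (List Int)), Dom_numberWays hats → Pre_numberWays hats →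
    Spec_numberWays hats (numberWays hats)

-- ===== LEMMAS AND PROOFS =====

def pvM : Int := 10 ^ 9 + 7

-- pure bottom-up rows: pvArow hats i mask = dp[i][mask]
def pvArow (hats : List (List Int)) : Nat → Nat → Int
  | 0, mask => if mask = 0 then 1 else 0
  | i + 1, mask =>
    ((pvPeople hats).getD (i + 1) []).foldl
      (fun acc p =>
        if mask &&& (1 <<< p) > 0 then
          PySem.Int.mod (acc + pvArow hats i (mask ^^^ (1 <<< p))) pvM
        else acc)
      (pvArow hats i mask)

-- pure top-down values: pvF hats k mask = ways(41-k, mask)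
def pvF (hats : List (List Int)) : Nat → Nat → Int
  | 0, mask => if mask = (1 <<< hats.length) - 1 then 1 else 0
  | k + 1, mask =>
    ((pvPeople hats).getD (40 - k) []).foldl
      (fun acc p =>
        if mask >>> p &&& 1 = 0 then
          PySem.Int.mod (acc + pvF hats k (mask ||| (1 <<< p))) pvM
        else acc)
      (pvF hats k mask)


def pvInv (hats : List (List Int)) (memo : PySem.Dict (Nat × Nat) Int) : Prop :=
  ∀ hat mask v, memo.get? (hat, mask) = some v → v = pvF hats (41 - hat) mask

theorem pvAltGo_correct (hats : List (List Int)) :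
    ∀ k, k ≤ 40 → ∀ mask memo, pvInv hats memo →
      (pvAltGo (pvPeople hats) ((1 <<< hats.length) - 1) k mask memo).1 = pvF hats k mask ∧
      pvInv hats (pvAltGo (pvPeople hats) ((1 <<< hats.length) - 1) k mask memo).2 := by
  intro k
  induction k with
  | zero =>
    intro _ mask memo hInv
    exact ⟨by simp [pvAltGo, pvF], by simpa [pvAltGo] using hInv⟩
  | succ k ih =>
    intro hk mask memo hInv
    have hk' : k ≤ 40 := by omega
    rw [pvAltGo]
    cases hmem : memo.get? (40 - k, mask) with
    | some v =>
      have hv := hInv (40 - k) mask v hmem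
      have h41 : 41 - (40 - k) = k + 1 := by omega
      rw [h41] at hv
      exact ⟨hv.symm ▸ rfl, hInv⟩
    | none =>
      obtain ⟨h0, hInv0⟩ := ih hk' mask memo hInv
      have inner : ∀ (l : List Nat) (acc : Int × PySem.Dict (Nat × Nat) Int), pvInv hats acc.2 →
          (List.foldl (fun (acc : Int × PySem.Dict (Nat × Nat) Int) p =>
              if mask >>> p &&& 1 = 0 then
                let r2 := pvAltGo (pvPeople hats) ((1 <<< hats.length) - 1) k (mask ||| (1 <<< p)) acc.2
                (PySem.Int.mod (acc.1 + r2.1) (10 ^ 9 + 7), r2.2)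
              else acc) acc l).1
            = List.foldl (fun a p =>
                if mask >>> p &&& 1 = 0 then
                  PySem.Int.mod (a + pvF hats k (mask ||| (1 <<< p))) pvM
                else a) acc.1 l ∧
          pvInv hats (List.foldl (fun (acc : Int × PySem.Dict (Nat × Nat) Int) p =>
              if mask >>> p &&& 1 = 0 then
                let r2 := pvAltGo (pvPeople hats) ((1 <<< hats.length) - 1) k (mask ||| (1 <<< p)) acc.2
                (PySem.Int.mod (acc.1 + r2.1) (10 ^ 9 + 7), r2.2)
              else acc) acc l).2 := by
        intro l
        induction l with
        | nil => intro acc h; exact ⟨rfl, h⟩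
        | cons p l ihl =>
          intro acc hacc
          by_cases hc : mask >>> p &&& 1 = 0
          · obtain ⟨hg, hgInv⟩ := ih hk' (mask ||| (1 <<< p)) acc.2 hacc
            simp only [List.foldl_cons, if_pos hc]
            obtain ⟨ih1, ih2⟩ := ihl (PySem.Int.mod (acc.1 + (pvAltGo (pvPeople hats) ((1 <<< hats.length) - 1) k (mask ||| (1 <<< p)) acc.2).1) (10 ^ 9 + 7), (pvAltGo (pvPeople hats) ((1 <<< hats.length) - 1) k (mask ||| (1 <<< p)) acc.2).2) hgInv
            refine ⟨?_, ih2⟩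
            rw [ih1, hg]
            rfl
          · simp only [List.foldl_cons, if_neg hc]
            exact ihl acc hacc
      obtain ⟨hfold, hfoldInv⟩ := inner ((pvPeople hats).getD (40 - k) [])
        (pvAltGo (pvPeople hats) ((1 <<< hats.length) - 1) k mask memo) hInv0
      constructor
      · show (_ : Int × PySem.Dict (Nat × Nat) Int).1 = _
        simp only []
        rw [hfold, h0]
        rfl
      · intro hat' mask' v hv
        simp only [] at hv
        rw [PySem.Dict.get?_insert] at hv
        split at hv
        · next heq =>
          have h1 : hat' = 40 - k := (Prod.ext_iff.mp heq).1
          have h2 : mask' = mask := (Prod.ext_iff.mp heq).2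
          have hveq := (Option.some.inj hv).symm
          subst h1; subst h2; subst hveq
          have h41 : 41 - (40 - k) = k + 1 := by omega
          rw [h41, hfold, h0]
          rfl
        · exact hfoldInv hat' mask' v hv

theorem pvB_bridge (hats : List (List Int)) : numberWays_alt hats = pvF hats 40 0 := by
  have h := pvAltGo_correct hats 40 (by omega) 0 PySem.Dict.empty
    (by intro hat mask v hv; rw [PySem.Dict.get?_empty] at hv; cases hv)
  exact h.1

theorem pv_getD_set {α : Type} (l : List α) (i j : Nat) (a : α) (d : α) :
    (l.set i a).getD j d = if i = j ∧ i < l.length then a else l.getD j d := by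
  simp only [List.getD_eq_getElem?_getD, List.getElem?_set]
  split_ifs with h1 h2 h3 h4 <;> simp_all
  omega

theorem pv_foldQ {α β : Type} (Q : β → Prop) (l : List α) (f : β → α → β) :
    ∀ (b : β), Q b → (∀ b x, x ∈ l → Q b → Q (f b x)) → Q (l.foldl f b) := by
  induction l with
  | nil => intro b hb _; exact hb
  | cons x l ihl =>
    intro b hb hstep
    exact ihl (f b x) (hstep b x (by simp) hb)
      (fun b' y hy hb' => hstep b' y (by simp [hy]) hb')

theorem pvPeople_mem (hats : List (List Int)) (h p : Nat)
    (hp : p ∈ (pvPeople hats).getD h []) : p < hats.length := by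
  unfold pvPeople at hp
  revert hp
  refine pv_foldQ (fun (ppl : List (List Nat)) => p ∈ ppl.getD h [] → p < hats.length) _ _ _ ?_ ?_
  · intro hmem
    exfalso
    have hnil : (List.replicate 41 ([] : List Nat)).getD h [] = [] := by
      rw [List.getD_eq_getElem?_getD, List.getElem?_replicate]
      split <;> rfl
    rw [hnil] at hmem
    cases hmem
  · rintro ppl ⟨xs, i⟩ hmem hQ
    have hi : i < hats.length := by
      have := List.mem_zipIdx hmem
      omega
    dsimp only
    refine pv_foldQ (fun (ppl : List (List Nat)) => p ∈ ppl.getD h [] → p < hats.length) _ _ _ hQ ?_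
    intro ppl' x _ hQ' hmem'
    set idx := (if x < 0 then x + 41 else x).toNat with hidx
    rw [pv_getD_set] at hmem'
    split_ifs at hmem' with hc
    · rcases List.mem_append.mp hmem' with hold | hnew
      · exact hQ' (hc.1 ▸ hold)
      · simp at hnew; omega
    · exact hQ' hmem'

theorem pv_row0 (t : Nat) :
    (List.replicate t (0 : Int)).set 0 1
      = (List.range t).map (fun m => if m = 0 then (1 : Int) else 0) := by
  apply List.ext_getElem (by simp)
  intro i h1 h2
  simp [List.getElem_set, List.getElem_replicate]
  split_ifs with ha hb <;> omega

def pvT (hats : List (List Int)) (j : Nat) : List (List Int) :=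
  (List.range' 1 j).foldl
    (fun (tb : List (List Int)) i =>
      let prev := tb.getD (i - 1) []
      tb.set i
        ((List.range (1 <<< hats.length)).map (fun mask =>
          ((pvPeople hats).getD i []).foldl
            (fun acc p =>
              if mask &&& (1 <<< p) > 0 then
                PySem.Int.mod (acc + prev.getD (mask ^^^ (1 <<< p)) 0) (10 ^ 9 + 7)
              else acc)
            (prev.getD mask 0))))
    (((List.replicate (1 <<< hats.length) (0 : Int)).set 0 1) ::
      List.replicate 40 (List.replicate (1 <<< hats.length) (0 : Int)))

theorem pvT_spec (hats : List (List Int)) :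
    ∀ j, j ≤ 40 → (pvT hats j).length = 41 ∧
      ∀ m, m ≤ j → (pvT hats j).getD m []
        = (List.range (1 <<< hats.length)).map (pvArow hats m) := by
  intro j
  induction j with
  | zero =>
    intro _
    refine ⟨by simp [pvT], ?_⟩
    intro m hm
    have hm0 : m = 0 := by omega
    subst hm0
    show (((List.replicate (1 <<< hats.length) (0 : Int)).set 0 1) ::
      List.replicate 40 (List.replicate (1 <<< hats.length) (0 : Int))).getD 0 [] = _
    rw [List.getD_cons_zero, pv_row0]
    exact List.map_congr_left (fun a _ => by simp [pvArow])
  | succ j ihj =>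
    intro hj
    obtain ⟨ihlen, ihrow⟩ := ihj (by omega)
    have hconcat : List.range' 1 (j + 1) = List.range' 1 j ++ [j + 1] := by
      rw [List.range'_concat]
      norm_num
      omega
    have hstep : pvT hats (j + 1)
        = (pvT hats j).set (j + 1)
          ((List.range (1 <<< hats.length)).map (fun mask =>
            ((pvPeople hats).getD (j + 1) []).foldl
              (fun acc p =>
                if mask &&& (1 <<< p) > 0 then
                  PySem.Int.mod (acc + ((pvT hats j).getD j []).getD (mask ^^^ (1 <<< p)) 0) (10 ^ 9 + 7)
                else acc)
              (((pvT hats j).getD j []).getD mask 0))) := by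
      show (List.range' 1 (j+1)).foldl _ _ = _
      rw [hconcat, List.foldl_append]
      rfl
    have hrow : (List.range (1 <<< hats.length)).map (fun mask =>
            ((pvPeople hats).getD (j + 1) []).foldl
              (fun acc p =>
                if mask &&& (1 <<< p) > 0 then
                  PySem.Int.mod (acc + ((pvT hats j).getD j []).getD (mask ^^^ (1 <<< p)) 0) (10 ^ 9 + 7)
                else acc)
              (((pvT hats j).getD j []).getD mask 0))
        = (List.range (1 <<< hats.length)).map (pvArow hats (j + 1)) := by
      refine List.map_congr_left (fun mask hmask => ?_)
      have hmask' : mask < 1 <<< hats.length := List.mem_range.mp hmask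
      rw [ihrow j (by omega)]
      conv_rhs => rw [pvArow]
      rw [PySem.List.getD_map_range _ _ _ _ hmask']
      refine PySem.List.foldl_congr_mem _ _ _ _ (fun acc p hp => ?_)
      have hpn := pvPeople_mem hats (j + 1) p hp
      have hx : mask ^^^ (1 <<< p) < 1 <<< hats.length := by
        simp only [Nat.one_shiftLeft] at *
        exact Nat.xor_lt_two_pow hmask' (Nat.pow_lt_pow_right one_lt_two hpn)
      rw [PySem.List.getD_map_range _ _ _ _ hx]
      rfl
    rw [hstep, hrow]
    refine ⟨by simpa using ihlen, ?_⟩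
    intro m hm
    rw [pv_getD_set]
    rcases Nat.lt_or_ge m (j + 1) with hlt | hge
    · rw [if_neg (by omega)]
      exact ihrow m (by omega)
    · have hm1 : m = j + 1 := by omega
      subst hm1
      rw [if_pos ⟨rfl, by omega⟩]

theorem pvA_bridge' (hats : List (List Int)) :
    numberWays hats = ((pvT hats 40).getD 40 []).getD ((1 <<< hats.length) - 1) 0 := rfl

theorem pvA_bridge2 (hats : List (List Int)) :
    numberWays hats = pvArow hats 40 ((1 <<< hats.length) - 1) := by
  rw [pvA_bridge', (pvT_spec hats 40 le_rfl).2 40 le_rfl,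
    PySem.List.getD_map_range _ _ _ _ (by have := Nat.one_shiftLeft hats.length ▸ Nat.two_pow_pos hats.length; omega)]

theorem pvArow_bounds (hats : List (List Int)) (i : Nat) :
    ∀ mask, 0 ≤ pvArow hats i mask ∧ pvArow hats i mask < pvM := by
  induction i with
  | zero => intro mask; rw [pvArow]; split_ifs <;> norm_num [pvM]
  | succ i ih =>
    intro mask
    rw [pvArow]
    refine pv_foldQ (fun a : Int => 0 ≤ a ∧ a < pvM) _ _ _ (ih mask) ?_
    intro b x _ _
    split_ifs
    · exact ⟨PySem.Int.mod_nonneg _ (by norm_num [pvM]), PySem.Int.mod_lt _ (by norm_num [pvM])⟩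
    · assumption

theorem pvF_bounds (hats : List (List Int)) (k : Nat) :
    ∀ mask, 0 ≤ pvF hats k mask ∧ pvF hats k mask < pvM := by
  induction k with
  | zero => intro mask; rw [pvF]; split_ifs <;> norm_num [pvM]
  | succ k ih =>
    intro mask
    rw [pvF]
    refine pv_foldQ (fun a : Int => 0 ≤ a ∧ a < pvM) _ _ _ (ih mask) ?_
    intro b x _ _
    split_ifs
    · exact ⟨PySem.Int.mod_nonneg _ (by norm_num [pvM]), PySem.Int.mod_lt _ (by norm_num [pvM])⟩
    · assumption

theorem pv_cast_mod (a : Int) :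
    ((PySem.Int.mod a pvM : Int) : ZMod 1000000007) = (a : ZMod 1000000007) := by
  rw [PySem.Int.mod_eq_emod_of_pos (by norm_num [pvM]), Int.emod_def]
  have h : ((pvM : Int) : ZMod 1000000007) = 0 := by
    show ((1000000007 : Int) : ZMod 1000000007) = 0
    exact_mod_cast ZMod.natCast_self 1000000007
  push_cast
  rw [h]
  ring

theorem pv_cast_foldl (l : List Nat) (c : Nat → Prop) [DecidablePred c] (g : Nat → Int) :
    ∀ init : Int,
    ((l.foldl (fun acc p => if c p then PySem.Int.mod (acc + g p) pvM else acc) init : Int)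
        : ZMod 1000000007)
      = (init : ZMod 1000000007)
        + (l.map (fun p => if c p then ((g p : Int) : ZMod 1000000007) else 0)).sum := by
  induction l with
  | nil => intro init; simp
  | cons p l ihl =>
    intro init
    simp only [List.foldl_cons, List.map_cons, List.sum_cons]
    by_cases hc : c p
    · rw [if_pos hc, if_pos hc, ihl, pv_cast_mod]
      push_cast
      ring
    · rw [if_neg hc, if_neg hc, ihl]
      ring

def pvZA (hats : List (List Int)) (i mask : Nat) : ZMod 1000000007 :=
  ((pvArow hats i mask : Int) : ZMod 1000000007)

def pvZF (hats : List (List Int)) (k mask : Nat) : ZMod 1000000007 :=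
  ((pvF hats k mask : Int) : ZMod 1000000007)

theorem pv_condA (m p : Nat) : (m &&& (1 <<< p) > 0) ↔ Nat.testBit m p = true := by
  simp only [Nat.one_shiftLeft, Nat.and_two_pow]
  cases h : Nat.testBit m p <;> simp

theorem pv_condB (m p : Nat) : (m >>> p &&& 1 = 0) ↔ Nat.testBit m p = false := by
  simp [Nat.testBit, Nat.and_one_is_mod]

theorem pv_or_eq_xor (m p : Nat) (h : Nat.testBit m p = false) : m ||| 2 ^ p = m ^^^ 2 ^ p := by
  apply Nat.eq_of_testBit_eq
  intro j
  rcases eq_or_ne j p with rfl | hne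
  · simp [Nat.testBit_xor, h, Nat.testBit_two_pow_self]
  · simp [Nat.testBit_xor, Nat.testBit_two_pow_of_ne (Ne.symm hne)]

theorem pv_hA (hats : List (List Int)) (i m : Nat) :
    pvZA hats (i + 1) m
      = pvZA hats i m
        + (((pvPeople hats).getD (i + 1) []).map
            (fun p => if Nat.testBit m p = true then pvZA hats i (m ^^^ 2 ^ p) else 0)).sum := by
  unfold pvZA
  conv_lhs => rw [pvArow]
  rw [pv_cast_foldl _ (fun p => m &&& (1 <<< p) > 0) (fun p => pvArow hats i (m ^^^ (1 <<< p)))]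
  congr 1
  refine congrArg List.sum (List.map_congr_left fun p _ => ?_)
  by_cases hb : Nat.testBit m p
  · rw [if_pos ((pv_condA m p).mpr hb), if_pos hb, Nat.one_shiftLeft]
  · rw [if_neg (fun hc => hb ((pv_condA m p).mp hc)), if_neg hb]

theorem pv_hF (hats : List (List Int)) (k m : Nat) :
    pvZF hats (k + 1) m
      = pvZF hats k m
        + (((pvPeople hats).getD (40 - k) []).map
            (fun p => if Nat.testBit m p = false then pvZF hats k (m ^^^ 2 ^ p) else 0)).sum := by
  unfold pvZF
  conv_lhs => rw [pvF]
  rw [pv_cast_foldl _ (fun p => m >>> p &&& 1 = 0) (fun p => pvF hats k (m ||| (1 <<< p)))]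
  congr 1
  refine congrArg List.sum (List.map_congr_left fun p _ => ?_)
  by_cases hb : Nat.testBit m p
  · rw [if_neg (fun hc => by rw [(pv_condB m p).mp hc] at hb; exact Bool.false_ne_true hb),
      if_neg (by simp [hb])]
  · have hb' : Nat.testBit m p = false := by simpa using hb
    rw [if_pos ((pv_condB m p).mpr hb'), if_pos hb', Nat.one_shiftLeft, pv_or_eq_xor m p hb']

theorem pv_invol (n p : Nat) (hp : p < n) (u v : Nat → ZMod 1000000007) :
    ∑ m ∈ Finset.range (2 ^ n), (if Nat.testBit m p = true then u (m ^^^ 2 ^ p) * v m else 0)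
      = ∑ m ∈ Finset.range (2 ^ n),
          (if Nat.testBit m p = false then u m * v (m ^^^ 2 ^ p) else 0) := by
  have hpow : 2 ^ p < 2 ^ n := Nat.pow_lt_pow_right one_lt_two hp
  refine Finset.sum_nbij' (fun m => m ^^^ 2 ^ p) (fun m => m ^^^ 2 ^ p) ?_ ?_ ?_ ?_ ?_
  · intro a ha
    exact Finset.mem_range.mpr (Nat.xor_lt_two_pow (Finset.mem_range.mp ha) hpow)
  · intro a ha
    exact Finset.mem_range.mpr (Nat.xor_lt_two_pow (Finset.mem_range.mp ha) hpow)
  · intro a _; simp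
  · intro a _; simp
  · intro a _
    by_cases hb : Nat.testBit a p
    · simp [hb, Nat.testBit_xor, Nat.testBit_two_pow_self]
    · simp [hb, Nat.testBit_xor, Nat.testBit_two_pow_self]

theorem pv_swap (t : Nat) (l : List Nat) (g : Nat → Nat → ZMod 1000000007) :
    ∑ m ∈ Finset.range t, (l.map (fun p => g m p)).sum
      = (l.map (fun p => ∑ m ∈ Finset.range t, g m p)).sum := by
  induction l with
  | nil => simp
  | cons p l ihl => simp [Finset.sum_add_distrib, ihl]

def pvS (hats : List (List Int)) (i : Nat) : ZMod 1000000007 :=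
  ∑ m ∈ Finset.range (2 ^ hats.length), pvZA hats i m * pvZF hats (40 - i) m

theorem pv_S_step (hats : List (List Int)) (i : Nat) (hi : i < 40) :
    pvS hats (i + 1) = pvS hats i := by
  unfold pvS
  have h1 : 40 - (i + 1) = 39 - i := by omega
  have h2 : 40 - i = (39 - i) + 1 := by omega
  have h3 : 40 - (39 - i) = i + 1 := by omega
  calc
    ∑ m ∈ Finset.range (2 ^ hats.length), pvZA hats (i + 1) m * pvZF hats (40 - (i + 1)) m
        = ∑ m ∈ Finset.range (2 ^ hats.length),
            (pvZA hats i m * pvZF hats (39 - i) m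
              + (((pvPeople hats).getD (i + 1) []).map
                  (fun p => if Nat.testBit m p = true then
                      pvZA hats i (m ^^^ 2 ^ p) * pvZF hats (39 - i) m else 0)).sum) := by
          refine Finset.sum_congr rfl (fun m _ => ?_)
          rw [h1, pv_hA, add_mul, ← List.sum_map_mul_right]
          congr 1
          refine congrArg List.sum (List.map_congr_left fun p _ => ?_)
          split_ifs <;> simp
    _ = ∑ m ∈ Finset.range (2 ^ hats.length), pvZA hats i m * pvZF hats (39 - i) m
          + (((pvPeople hats).getD (i + 1) []).map
              (fun p => ∑ m ∈ Finset.range (2 ^ hats.length),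
                if Nat.testBit m p = true then
                  pvZA hats i (m ^^^ 2 ^ p) * pvZF hats (39 - i) m else 0)).sum := by
          rw [Finset.sum_add_distrib, pv_swap]
    _ = ∑ m ∈ Finset.range (2 ^ hats.length), pvZA hats i m * pvZF hats (39 - i) m
          + (((pvPeople hats).getD (i + 1) []).map
              (fun p => ∑ m ∈ Finset.range (2 ^ hats.length),
                if Nat.testBit m p = false then
                  pvZA hats i m * pvZF hats (39 - i) (m ^^^ 2 ^ p) else 0)).sum := by
          congr 1
          refine congrArg List.sum (List.map_congr_left fun p hp => ?_)
          exact pv_invol hats.length p (pvPeople_mem hats (i + 1) p hp)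
            (pvZA hats i) (pvZF hats (39 - i))
    _ = ∑ m ∈ Finset.range (2 ^ hats.length),
            (pvZA hats i m * pvZF hats (39 - i) m
              + (((pvPeople hats).getD (i + 1) []).map
                  (fun p => if Nat.testBit m p = false then
                      pvZA hats i m * pvZF hats (39 - i) (m ^^^ 2 ^ p) else 0)).sum) := by
          rw [Finset.sum_add_distrib, pv_swap]
    _ = ∑ m ∈ Finset.range (2 ^ hats.length), pvZA hats i m * pvZF hats (40 - i) m := by
          refine Finset.sum_congr rfl (fun m _ => ?_)
          rw [h2, pv_hF, h3, mul_add]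
          congr 1
          rw [← List.sum_map_mul_left]
          refine congrArg List.sum (List.map_congr_left fun p _ => ?_)
          split_ifs <;> simp

theorem pv_S_const (hats : List (List Int)) : pvS hats 40 = pvS hats 0 := by
  have h : ∀ i, i ≤ 40 → pvS hats i = pvS hats 0 := by
    intro i
    induction i with
    | zero => intro _; rfl
    | succ i ih =>
      intro hle
      rw [pv_S_step hats i (by omega)]
      exact ih (by omega)
  exact h 40 le_rfl

theorem pv_S40 (hats : List (List Int)) :
    pvS hats 40 = pvZA hats 40 (2 ^ hats.length - 1) := by
  unfold pvS
  have hF0 : ∀ m, pvZF hats 0 m = if m = 2 ^ hats.length - 1 then 1 else 0 := by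
    intro m
    unfold pvZF
    rw [pvF, Nat.one_shiftLeft]
    split_ifs <;> simp
  calc
    ∑ m ∈ Finset.range (2 ^ hats.length), pvZA hats 40 m * pvZF hats (40 - 40) m
        = ∑ m ∈ Finset.range (2 ^ hats.length),
            if m = 2 ^ hats.length - 1 then pvZA hats 40 m else 0 := by
          refine Finset.sum_congr rfl fun m _ => ?_
          rw [show (40 : Nat) - 40 = 0 from rfl, hF0 m]
          split_ifs <;> simp
    _ = pvZA hats 40 (2 ^ hats.length - 1) := by
          rw [Finset.sum_ite_eq' (Finset.range (2 ^ hats.length)) (2 ^ hats.length - 1)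
            (pvZA hats 40), if_pos (Finset.mem_range.mpr
              (by have := Nat.two_pow_pos hats.length; omega))]

theorem pv_S0 (hats : List (List Int)) : pvS hats 0 = pvZF hats 40 0 := by
  unfold pvS
  have hA0 : ∀ m, pvZA hats 0 m = if m = 0 then 1 else 0 := by
    intro m
    unfold pvZA
    rw [pvArow]
    split_ifs <;> simp
  calc
    ∑ m ∈ Finset.range (2 ^ hats.length), pvZA hats 0 m * pvZF hats (40 - 0) m
        = ∑ m ∈ Finset.range (2 ^ hats.length),
            if m = 0 then pvZF hats 40 m else 0 := by
          refine Finset.sum_congr rfl fun m _ => ?_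
          rw [hA0 m]
          split_ifs <;> simp
    _ = pvZF hats 40 0 := by
          rw [Finset.sum_ite_eq' (Finset.range (2 ^ hats.length)) 0 (pvZF hats 40),
            if_pos (Finset.mem_range.mpr (Nat.two_pow_pos hats.length))]

theorem pv_core' (hats : List (List Int)) :
    pvArow hats 40 ((1 <<< hats.length) - 1) = pvF hats 40 0 := by
  have hsh : (1 <<< hats.length) - 1 = 2 ^ hats.length - 1 := by rw [Nat.one_shiftLeft]
  rw [hsh]
  have hz : ((pvArow hats 40 (2 ^ hats.length - 1) : Int) : ZMod 1000000007)
      = ((pvF hats 40 0 : Int) : ZMod 1000000007) := by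
    show pvZA hats 40 (2 ^ hats.length - 1) = pvZF hats 40 0
    rw [← pv_S40, pv_S_const, pv_S0]
  have ha := pvArow_bounds hats 40 (2 ^ hats.length - 1)
  have hb := pvF_bounds hats 40 0
  have hdvd : ((1000000007 : Nat) : Int) ∣ (pvArow hats 40 (2 ^ hats.length - 1) - pvF hats 40 0) := by
    refine (ZMod.intCast_zmod_eq_zero_iff_dvd _ _).mp ?_
    push_cast
    rw [hz]
    ring
  have habs : |pvArow hats 40 (2 ^ hats.length - 1) - pvF hats 40 0| < ((1000000007 : Nat) : Int) := by
    have hM : pvM = 1000000007 := by norm_num [pvM]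
    rw [hM] at ha hb
    rw [abs_lt]
    push_cast
    omega
  have h0 := Int.eq_zero_of_abs_lt_dvd hdvd habs
  omega

-- ===== VERDICT (by name: the statement is the Claim_ definition above) =====
theorem numberWays_spec : Claim_equal_numberWays := by
  intro hats _ _
  unfold Spec_numberWays
  rw [pvA_bridge2, pvB_bridge, pv_core']
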